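-- pv_equiv track=rewrite | github.com/DPNT-Sourcecode/CHK-wwzm01 | CHK/fourth_draft.py | special_offer_for
-- ===== SOURCE A (Python) =====
-- def special_offer_for(product, product_amounts, product_price, special_offer, special_price, special_offer_2=None, special_price_2=None):
--     cost = 0
--
--     #do we need to apply special_offer?
--     if product_amounts[product] >= special_offer:
--         cost += int(product_amounts[product]/special_offer) * special_price #work out how many multiples of special_offer for product which requires special price
--         product_amounts[product] = product_amounts[product] % special_offer #find remaining products after special_offer applied
--
--         #do we have special_offer_2?
--         if special_offer_2:
--             cost += special_offer_for(product, product_amounts, product_price, special_offer_2, special_price_2)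
--
--         #no special_offer_2, just add extra products
--         else:
--             cost += product_amounts[product] % special_offer * product_price #also add any individual As on top
--
--     #not applying special_offer
--     else:
--
--         #do we have special_offer_2?
--         if special_offer_2:
--             cost += special_offer_for(product, product_amounts, product_price, special_offer_2, special_price_2)
--
--         #no special_offer_2, just add extra products
--         else:
--             cost += product_amounts[product] * product_price #if less than 3 As, just work out individual
--     return cost
-- ===== SOURCE B (Python) =====
-- def special_offer_for(product, product_amounts, product_price, special_offer, special_price, special_offer_2=None, special_price_2=None):
--     cost = 0
--     for qty, price in ((special_offer, special_price), (special_offer_2, special_price_2)):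
--         if qty and product_amounts[product] >= qty:
--             cost += int(product_amounts[product] / qty) * price
--             product_amounts[product] %= qty
--     return cost + product_amounts[product] * product_price
-- ===== Notes on version B (the rewrite author's own statement) =====
-- stated objective: simpler
-- what changed: A's one-level self-recursion over the two special offers is replaced by a single loop over the list of (offer, price) pairs, with one leftover-units charge after the loop.
import Mathlib
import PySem

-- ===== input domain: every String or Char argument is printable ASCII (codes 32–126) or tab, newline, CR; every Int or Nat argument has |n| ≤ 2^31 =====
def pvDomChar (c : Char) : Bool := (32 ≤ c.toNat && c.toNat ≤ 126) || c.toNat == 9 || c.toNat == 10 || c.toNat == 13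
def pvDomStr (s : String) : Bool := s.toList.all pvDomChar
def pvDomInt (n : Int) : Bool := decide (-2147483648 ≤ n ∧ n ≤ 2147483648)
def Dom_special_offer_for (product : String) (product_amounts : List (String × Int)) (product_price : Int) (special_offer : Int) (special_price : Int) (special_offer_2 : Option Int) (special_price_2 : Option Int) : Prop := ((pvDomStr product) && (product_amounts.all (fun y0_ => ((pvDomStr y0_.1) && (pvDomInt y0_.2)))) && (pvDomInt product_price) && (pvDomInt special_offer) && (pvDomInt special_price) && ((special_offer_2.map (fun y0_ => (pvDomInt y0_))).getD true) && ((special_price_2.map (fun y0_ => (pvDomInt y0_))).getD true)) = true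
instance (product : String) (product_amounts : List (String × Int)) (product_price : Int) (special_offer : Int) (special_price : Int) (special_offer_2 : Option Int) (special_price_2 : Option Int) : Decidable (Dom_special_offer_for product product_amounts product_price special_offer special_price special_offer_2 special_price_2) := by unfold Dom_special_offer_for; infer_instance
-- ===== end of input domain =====

-- B replaces A's one-level self-recursion over the two offers by a single loop over the
-- (offer, price) pairs (objective: simpler). Both Pythons mutate product_amounts[product]
-- identically in place; the equivalence proved here is about the return value.

-- Python truthiness of an Optional[int]: None and 0 are falsy.
def pyTruthyInt : Option Int → Bool
  | none => false
  | some v => v != 0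

-- ===== PORT A =====
-- int(x/y) is PySem.Int.truncdiv (exact here: Dom bounds |values| by 2^31 < 2^53).
-- product_amounts[product] is getD product 0: Pre_ guarantees the key is present (else KeyError).
-- (sp2.getD 0): A passes special_price_2 on; when it is None and it would be used, the Python
-- raises TypeError — those inputs are excluded by Pre_, so the 0 default is never observed.
def special_offer_for (product : String) (product_amounts : List (String × Int)) (product_price : Int) (special_offer : Int) (special_price : Int) (special_offer_2 : Option Int) (special_price_2 : Option Int) : Int :=
  let d : PySem.Dict String Int := PySem.Dict.mk product_amounts
  if special_offer ≤ d.getD product 0 then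
    let c := PySem.Int.truncdiv (d.getD product 0) special_offer * special_price
    let d' := d.insert product (PySem.Int.mod (d.getD product 0) special_offer)
    if pyTruthyInt special_offer_2 then
      c + special_offer_for product d'.items product_price (special_offer_2.getD 0) (special_price_2.getD 0) none none
    else
      c + PySem.Int.mod (d'.getD product 0) special_offer * product_price
  else
    if pyTruthyInt special_offer_2 then
      special_offer_for product product_amounts product_price (special_offer_2.getD 0) (special_price_2.getD 0) none none
    else
      d.getD product 0 * product_price
termination_by (if special_offer_2.isSome then 1 else 0)
decreasing_by
  · cases special_offer_2 <;> simp_all [pyTruthyInt]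
  · cases special_offer_2 <;> simp_all [pyTruthyInt]

-- ===== PORT B =====
-- one fold over the two (offer, price) pairs, state = (cost, dict); then leftover units.
def special_offer_for_alt (product : String) (product_amounts : List (String × Int)) (product_price : Int) (special_offer : Int) (special_price : Int) (special_offer_2 : Option Int) (special_price_2 : Option Int) : Int :=
  let step : (Int × PySem.Dict String Int) → (Option Int × Option Int) → (Int × PySem.Dict String Int) :=
    fun st qp =>
      match qp.1 with
      | none => st
      | some q =>
        if q ≠ 0 ∧ q ≤ st.2.getD product 0 then
          (st.1 + PySem.Int.truncdiv (st.2.getD product 0) q * qp.2.getD 0,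
           st.2.insert product (PySem.Int.mod (st.2.getD product 0) q))
        else st
  let fin := [(some special_offer, some special_price), (special_offer_2, special_price_2)].foldl step (0, PySem.Dict.mk product_amounts)
  fin.1 + fin.2.getD product 0 * product_price

-- ===== PRECONDITION & SPEC =====
-- Pre_ excludes exactly the inputs where the Python A raises: product missing from the dict
-- (KeyError), special_offer = 0 with a non-negative amount (ZeroDivisionError), and a truthy
-- special_offer_2 with special_price_2 = None that actually gets applied (TypeError).
def Pre_special_offer_for (product : String) (product_amounts : List (String × Int)) (product_price : Int) (special_offer : Int) (special_price : Int) (special_offer_2 : Option Int) (special_price_2 : Option Int) : Prop :=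
  (PySem.Dict.mk product_amounts).contains product = true ∧
  ¬(special_offer = 0 ∧ 0 ≤ (PySem.Dict.mk product_amounts).getD product 0) ∧
  ¬(special_price_2 = none ∧ pyTruthyInt special_offer_2 = true ∧
      special_offer_2.getD 0 ≤
        (if special_offer ≠ 0 ∧ special_offer ≤ (PySem.Dict.mk product_amounts).getD product 0
         then PySem.Int.mod ((PySem.Dict.mk product_amounts).getD product 0) special_offer
         else (PySem.Dict.mk product_amounts).getD product 0))
instance (product : String) (product_amounts : List (String × Int)) (product_price : Int) (special_offer : Int) (special_price : Int) (special_offer_2 : Option Int) (special_price_2 : Option Int) : Decidable (Pre_special_offer_for product product_amounts product_price special_offer special_price special_offer_2 special_price_2) := by unfold Pre_special_offer_for; infer_instance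

def pvWitness_special_offer_for : String × (List (String × Int)) × Int × Int × Int × Option Int × Option Int :=
  ("A", [("A", 7)], 1, 3, 5, some 2, some 3)

def Spec_special_offer_for (product : String) (product_amounts : List (String × Int)) (product_price : Int) (special_offer : Int) (special_price : Int) (special_offer_2 : Option Int) (special_price_2 : Option Int) (out : Int) : Prop := out = special_offer_for_alt product product_amounts product_price special_offer special_price special_offer_2 special_price_2
instance (product : String) (product_amounts : List (String × Int)) (product_price : Int) (special_offer : Int) (special_price : Int) (special_offer_2 : Option Int) (special_price_2 : Option Int) (out : Int) : Decidable (Spec_special_offer_for product product_amounts product_price special_offer special_price special_offer_2 special_price_2 out) := by unfold Spec_special_offer_for; infer_instance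

-- ===== CLAIM (what is proved, stated in full; the proofs are below) =====
def Claim_equal_special_offer_for : Prop := ∀ (product : String) (product_amounts : List (String × Int)) (product_price : Int) (special_offer : Int) (special_price : Int) (special_offer_2 : Option Int) (special_price_2 : Option Int), Dom_special_offer_for product product_amounts product_price special_offer special_price special_offer_2 special_price_2 → Pre_special_offer_for product product_amounts product_price special_offer special_price special_offer_2 special_price_2 → Spec_special_offer_for product product_amounts product_price special_offer special_price special_offer_2 special_price_2 (special_offer_for product product_amounts product_price special_offer special_price special_offer_2 special_price_2)

-- ===== LEMMAS AND PROOFS =====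

-- Python % by the same divisor is idempotent (A charges leftover as (a % q) % q, B as a % q)
theorem pymod_idem (a b : Int) : PySem.Int.mod (PySem.Int.mod a b) b = PySem.Int.mod a b := by
  simp [PySem.Int.mod]

-- the inner pass/recursive call: one offer (q, p) applied to amount a, leftover charged at pp
theorem sof_none (product : String) (pa : List (String × Int)) (pp q p : Int)
    (hq : q ≠ 0 ∨ ¬ q ≤ (PySem.Dict.mk pa).getD product 0) :
    special_offer_for product pa pp q p none none =
      if q ≤ (PySem.Dict.mk pa).getD product 0 then
        PySem.Int.truncdiv ((PySem.Dict.mk pa).getD product 0) q * p +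
          PySem.Int.mod ((PySem.Dict.mk pa).getD product 0) q * pp
      else (PySem.Dict.mk pa).getD product 0 * pp := by
  rw [special_offer_for]
  have hf : pyTruthyInt (none : Option Int) = false := rfl
  by_cases h : q ≤ (PySem.Dict.mk pa).getD product 0
  · have hq0 : q ≠ 0 := by tauto
    rw [if_pos h, if_pos h]
    simp [hf, PySem.Dict.getD_insert_self, PySem.Int.mod]
  · rw [if_neg h, if_neg h]
    simp [hf]

theorem special_offer_for_spec : Claim_equal_special_offer_for := by
  unfold Claim_equal_special_offer_for
  intro product pa pp so sp so2 sp2 _hdom hpre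
  obtain ⟨-, hz, -⟩ := hpre
  unfold Spec_special_offer_for special_offer_for_alt
  simp only [List.foldl]
  rw [special_offer_for]
  have hmk : ∀ (e : PySem.Dict String Int), PySem.Dict.mk e.items = e := fun _ => rfl
  by_cases h1 : so ≤ (PySem.Dict.mk pa).getD product 0
  · have hso : so ≠ 0 := by rintro rfl; exact hz ⟨rfl, h1⟩
    rw [if_pos h1]
    cases so2 with
    | none =>
        simp [pyTruthyInt, PySem.Dict.getD_insert_self, pymod_idem, hso, h1]
    | some v =>
        by_cases hv : v = 0
        · subst hv
          simp [pyTruthyInt, PySem.Dict.getD_insert_self, pymod_idem, hso, h1]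
        · have ht : pyTruthyInt (some v) = true := by simp [pyTruthyInt, hv]
          rw [if_pos ht]
          simp only [Option.getD_some]
          rw [sof_none product _ pp v (sp2.getD 0) (Or.inl hv)]
          simp only [hmk, PySem.Dict.getD_insert_self, Option.getD_some]
          by_cases h2 : v ≤ PySem.Int.mod ((PySem.Dict.mk pa).getD product 0) so
          · rw [if_pos h2]
            simp [hso, h1, hv, h2, PySem.Dict.getD_insert_self, pymod_idem]
            try ring
          · rw [if_neg h2]
            simp [hso, h1, hv, h2, PySem.Dict.getD_insert_self, pymod_idem]
            try ring
  · rw [if_neg h1]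
    have hskip : ¬(so ≠ 0 ∧ so ≤ (PySem.Dict.mk pa).getD product 0) := fun h => h1 h.2
    cases so2 with
    | none => simp [pyTruthyInt, hskip]
    | some v =>
        by_cases hv : v = 0
        · subst hv; simp [pyTruthyInt, hskip]
        · have ht : pyTruthyInt (some v) = true := by simp [pyTruthyInt, hv]
          rw [if_pos ht]
          simp only [Option.getD_some]
          rw [sof_none product pa pp v (sp2.getD 0) (Or.inl hv)]
          by_cases h2 : v ≤ (PySem.Dict.mk pa).getD product 0
          · rw [if_pos h2]
            simp [hskip, hv, h2, PySem.Dict.getD_insert_self, pymod_idem]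
            try ring
          · rw [if_neg h2]
            simp [hskip, hv, h2]

-- ===== VERDICT (by name: the statement is the Claim_ definition above) =====
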